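-- pv_equiv track=rewrite | github.com/hytmachineworks/NLP_100 | codes/chapter_01/problem_no_04.py | problem_no_04
-- ===== SOURCE A (Python) =====
-- def problem_no_04(target_sentence):
--     """ Exchage sentence to word length list
--
--     :param target_sentence: given sentence
--     :return: word length list
--     """
--     replace_char = [",", "."]
--     replaced_sentence = target_sentence
--
--     for rep_char in replace_char:
--         replaced_sentence = replaced_sentence.replace(rep_char, "")
--
--     word_list = replaced_sentence.split(" ")
--
--     word_length_list = [len(word) for word in word_list]
--
--     return word_length_list
-- ===== SOURCE B (Python) =====
-- def problem_no_04(target_sentence):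
--     """Single pass: skip punctuation, emit the running count at each space, and once at the end."""
--     word_length_list = []
--     count = 0
--     for ch in target_sentence:
--         if ch == ',' or ch == '.':
--             continue
--         if ch == ' ':
--             word_length_list.append(count)
--             count = 0
--         else:
--             count += 1
--     word_length_list.append(count)
--     return word_length_list
-- ===== Notes on version B (the rewrite author's own statement) =====
-- stated objective: alternative
-- what changed: Replaces the replace-replace-split-map pipeline (which builds two cleaned strings and a word list) by one left-to-right pass over the characters with a running counter, emitting a length at each space and once at the end; it trades CPython's C-level string methods for a single explicit loop with no intermediate strings.
import Mathlib
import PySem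

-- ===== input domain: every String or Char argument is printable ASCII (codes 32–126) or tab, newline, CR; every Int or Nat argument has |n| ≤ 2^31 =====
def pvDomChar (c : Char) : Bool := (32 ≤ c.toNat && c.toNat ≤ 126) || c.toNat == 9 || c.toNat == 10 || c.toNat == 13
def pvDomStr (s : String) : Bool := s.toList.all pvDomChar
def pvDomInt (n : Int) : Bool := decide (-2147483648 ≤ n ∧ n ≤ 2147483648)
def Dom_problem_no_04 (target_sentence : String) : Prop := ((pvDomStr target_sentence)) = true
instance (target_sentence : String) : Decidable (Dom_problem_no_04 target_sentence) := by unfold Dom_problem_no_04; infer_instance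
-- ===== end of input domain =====

-- B replaces A's replace/replace/split/map pipeline by a single left-to-right pass with a
-- running counter (objective: alternative algorithm, no intermediate strings; not claimed faster).

-- ===== PORT A =====
-- A: strip ',' and '.' via successive replace, split on ' ', map len.
def problem_no_04 (target_sentence : String) : List Int :=
  let replace_char : List String := [",", "."]
  let replaced_sentence :=
    replace_char.foldl (fun s rep_char => PySem.Str.replace s rep_char "") target_sentence
  -- split(" ") with the literal nonempty separator " " is exactly Chars.splitOn on the char list
  let word_list := PySem.Chars.splitOn replaced_sentence.toList [' ']
  word_list.map (fun word => (word.length : Int))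

-- ===== PORT B =====
-- B: one pass; skip punctuation, emit the running count at each space and once at the end.
def problem_no_04_alt (target_sentence : String) : List Int :=
  let st := target_sentence.toList.foldl
    (fun (st : List Int × Int) ch =>
      if ch = ',' ∨ ch = '.' then st
      else if ch = ' ' then (st.1 ++ [st.2], 0)
      else (st.1, st.2 + 1))
    ([], 0)
  st.1 ++ [st.2]

-- ===== PRECONDITION & SPEC =====
def Spec_problem_no_04 (target_sentence : String) (out : List Int) : Prop := out = problem_no_04_alt target_sentence
instance (target_sentence : String) (out : List Int) : Decidable (Spec_problem_no_04 target_sentence out) := by unfold Spec_problem_no_04; infer_instance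

-- ===== CLAIM (what is proved, stated in full; the proofs are below) =====
def Claim_equal_problem_no_04 : Prop := ∀ (target_sentence : String), Dom_problem_no_04 target_sentence → Spec_problem_no_04 target_sentence (problem_no_04 target_sentence)

-- ===== LEMMAS AND PROOFS =====

-- segment lengths of a space-separated list, with n chars already seen in the current segment
def pvSegs : List Char → Int → List Int
  | [], n => [n]
  | c :: t, n => if c = ' ' then n :: pvSegs t 0 else pvSegs t (n + 1)

-- replacing a single character by "" is filtering it out
theorem pv_replace_go (c : Char) :
    ∀ (fuel : Nat) (l acc : List Char), l.length ≤ fuel →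
      PySem.Chars.replace.go [c] [] fuel l acc = acc.reverse ++ l.filter (fun d => d != c) := by
  intro fuel
  induction fuel with
  | zero =>
    intro l acc h
    have : l = [] := List.eq_nil_of_length_eq_zero (Nat.le_zero.mp h)
    subst this; simp [PySem.Chars.replace.go]
  | succ n ih =>
    intro l acc h
    cases l with
    | nil => simp [PySem.Chars.replace.go]
    | cons d t =>
      by_cases hd : d = c
      · subst hd
        have hp : List.isPrefixOf [d] (d :: t) = true := by simp [List.isPrefixOf]
        simp only [PySem.Chars.replace.go, hp, if_pos, List.length_cons, List.length_nil,
          List.drop_succ_cons, List.drop_zero, List.reverse_nil, List.nil_append]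
        rw [ih t acc (by simpa using Nat.le_of_succ_le_succ h)]
        simp
      · have hp : List.isPrefixOf [c] (d :: t) = false := by
          simp [List.isPrefixOf]; exact fun hcd => (hd hcd.symm).elim
        simp only [PySem.Chars.replace.go, hp, Bool.false_eq_true, if_false]
        rw [ih t (d :: acc) (by simpa using Nat.le_of_succ_le_succ h)]
        simp [hd]

theorem pv_replace_single (c : Char) (l : List Char) :
    PySem.Chars.replace l [c] [] = l.filter (fun d => d != c) := by
  have : ([c] : List Char).isEmpty = false := rfl
  simp only [PySem.Chars.replace, this, Bool.false_eq_true, if_false]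
  simpa using pv_replace_go c l.length l []

-- lengths of splitOn-on-space segments, via the fuelled splitter
theorem pv_split_go :
    ∀ (fuel : Nat) (l cur : List Char) (acc : List (List Char)), l.length ≤ fuel →
      (PySem.Chars.splitOn.go [' '] fuel l cur acc).map (fun w => (w.length : Int)) =
        acc.reverse.map (fun w => (w.length : Int)) ++ pvSegs l (cur.length : Int) := by
  intro fuel
  induction fuel with
  | zero =>
    intro l cur acc h
    have : l = [] := List.eq_nil_of_length_eq_zero (Nat.le_zero.mp h)
    subst this; simp [PySem.Chars.splitOn.go, pvSegs]
  | succ n ih =>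
    intro l cur acc h
    cases l with
    | nil => simp [PySem.Chars.splitOn.go, pvSegs]
    | cons d t =>
      by_cases hd : d = ' '
      · subst hd
        have hp : List.isPrefixOf [' '] (' ' :: t) = true := by simp [List.isPrefixOf]
        simp only [PySem.Chars.splitOn.go, hp, if_pos, List.length_cons, List.length_nil,
          List.drop_succ_cons, List.drop_zero]
        rw [ih t [] (cur.reverse :: acc) (by simpa using Nat.le_of_succ_le_succ h)]
        simp [pvSegs]
      · have hp : List.isPrefixOf [' '] (d :: t) = false := by
          simp [List.isPrefixOf]; exact fun hcd => (hd hcd.symm).elim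
        simp only [PySem.Chars.splitOn.go, hp, Bool.false_eq_true, if_false]
        rw [ih t (d :: cur) acc (by simpa using Nat.le_of_succ_le_succ h)]
        simp [pvSegs, hd]

theorem pv_splitOn_len (l : List Char) :
    (PySem.Chars.splitOn l [' ']).map (fun w => (w.length : Int)) = pvSegs l 0 := by
  simpa using pv_split_go (l.length + 1) l [] [] (by omega)

-- B's fold, finalised, computes pvSegs of the punctuation-filtered list
theorem pv_fold_segs :
    ∀ (l : List Char) (L : List Int) (n : Int),
      (l.foldl (fun (st : List Int × Int) ch =>
          if ch = ',' ∨ ch = '.' then st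
          else if ch = ' ' then (st.1 ++ [st.2], 0)
          else (st.1, st.2 + 1)) (L, n)).1 ++
      [(l.foldl (fun (st : List Int × Int) ch =>
          if ch = ',' ∨ ch = '.' then st
          else if ch = ' ' then (st.1 ++ [st.2], 0)
          else (st.1, st.2 + 1)) (L, n)).2] =
      L ++ pvSegs (l.filter (fun d => d != ',' && d != '.')) n := by
  intro l
  induction l with
  | nil => intro L n; simp [pvSegs]
  | cons c t ih =>
    intro L n
    by_cases hp : c = ',' ∨ c = '.'
    · have hf : (c != ',' && c != '.') = false := by
        rcases hp with h | h <;> subst h <;> simp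
      simp only [List.foldl_cons, if_pos hp, List.filter_cons, hf, Bool.false_eq_true, if_false]
      exact ih L n
    · have hf : (c != ',' && c != '.') = true := by
        push Not at hp; simp [hp.1, hp.2]
      by_cases hs : c = ' '
      · subst hs
        simp only [List.foldl_cons, if_neg hp, List.filter_cons, hf, if_pos]
        rw [ih (L ++ [n]) 0]
        simp [pvSegs]
      · simp only [List.foldl_cons, if_neg hp, if_neg hs, List.filter_cons, hf, if_pos]
        rw [ih L (n + 1)]
        simp [pvSegs, hs]

-- ===== VERDICT (by name: the statement is the Claim_ definition above) =====
theorem problem_no_04_spec : Claim_equal_problem_no_04 := by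
  intro s _
  unfold Spec_problem_no_04 problem_no_04 problem_no_04_alt
  simp only [List.foldl_cons, List.foldl_nil, PySem.Str.replace, String.toList_ofList,
    show (",".toList) = [','] from rfl, show (".".toList) = ['.'] from rfl,
    show ("".toList) = ([] : List Char) from rfl]
  rw [pv_replace_single, pv_replace_single, pv_splitOn_len, pv_fold_segs,
    List.filter_filter]
  simp [Bool.and_comm]
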